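-- pv_equiv track=rewrite | github.com/Pawo0/WDI | Zestaw3/zad8.py | jump_by_factor_to_last
-- ===== SOURCE A (Python) =====
-- def jump_by_factor_to_last(x: list) -> bool:
--     looking_for = len(x) - 1
--     first_number = x[0]
--     factor = 2
--     while factor <= first_number:
--         if first_number % factor == 0:
--             if factor == looking_for:
--                 return True
--             first_number //= factor
--         else:
--             factor += 1
--     return False
-- ===== SOURCE B (Python) =====
-- def jump_by_factor_to_last(x: list) -> bool:
--     # True iff len(x)-1 is a prime divisor of x[0], tested by odd trial division up to sqrt(p).
--     p = len(x) - 1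
--     n = x[0]
--     if n <= 0 or p < 2 or n % p != 0:
--         return False
--     if p % 2 == 0:
--         return p == 2
--     d = 3
--     while d * d <= p:
--         if p % d == 0:
--             return False
--         d += 2
--     return True
-- ===== Notes on version B (the rewrite author's own statement) =====
-- stated objective: alternative
-- what changed: A strips prime factors of the first element one by one in a while loop; B instead tests directly that len(x)-1 is prime (odd trial division up to its square root) and divides the positive first element.
import Mathlib
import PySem

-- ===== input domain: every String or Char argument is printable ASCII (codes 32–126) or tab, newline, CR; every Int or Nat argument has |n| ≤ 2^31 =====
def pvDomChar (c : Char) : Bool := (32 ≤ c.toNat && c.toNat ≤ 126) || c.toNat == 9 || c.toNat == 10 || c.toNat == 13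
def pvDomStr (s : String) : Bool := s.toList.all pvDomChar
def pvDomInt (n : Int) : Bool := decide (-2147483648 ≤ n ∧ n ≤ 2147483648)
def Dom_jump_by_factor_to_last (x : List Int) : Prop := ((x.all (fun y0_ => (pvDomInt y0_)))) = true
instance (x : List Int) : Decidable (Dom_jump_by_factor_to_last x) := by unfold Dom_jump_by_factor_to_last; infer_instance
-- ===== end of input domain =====

-- B replaces A's factor-stripping while loop by a direct test that len(x)-1 is a prime
-- divisor of x[0], via odd trial division up to sqrt(len(x)-1) (objective: alternative).

-- ===== PORT A =====
-- A's while-loop; the hypothesis 2 ≤ factor records the only states Python ever reaches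
-- (factor starts at 2 and never decreases) and is needed for termination.
def jumpLoopA (looking_for : Int) (first_number factor : Int) (hf : 2 ≤ factor) : Bool :=
  if hle : factor ≤ first_number then
    if hdvd : PySem.Int.mod first_number factor = 0 then
      if factor = looking_for then true
      else jumpLoopA looking_for (PySem.Int.floordiv first_number factor) factor hf
    else jumpLoopA looking_for first_number (factor + 1) (by omega)
  else false
termination_by ((first_number.toNat, (first_number - factor).toNat) : Nat × Nat)
decreasing_by
  · apply Prod.Lex.left
    have h0 : (0:Int) < factor := by omega
    have := PySem.Int.floordiv_eq_ediv_of_pos (a := first_number) h0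
    rw [this]
    have h1 : first_number / factor < first_number := by
      rw [Int.ediv_lt_iff_lt_mul (by omega)]; nlinarith
    omega
  · apply Prod.Lex.right
    have hne : factor ≠ first_number := by
      intro h; subst h
      exact hdvd ((PySem.Int.mod_eq_zero_iff_dvd _ _).2 (dvd_refl _))
    omega

def jump_by_factor_to_last (x : List Int) : Bool :=
  match PySem.List.pyGet? x 0 with
  | none => false   -- unreachable under Pre_ (Python raises IndexError on [])
  | some first_number => jumpLoopA ((x.length : Int) - 1) first_number 2 (by omega)

-- ===== PORT B =====
-- B's odd trial-division loop; 1 ≤ d holds on every reachable state (d starts at 3).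
def jumpLoopB (p d : Int) (hd : 1 ≤ d) : Bool :=
  if hle : d * d ≤ p then
    if PySem.Int.mod p d = 0 then false
    else jumpLoopB p (d + 2) (by omega)
  else true
termination_by (p + 2 - d).toNat
decreasing_by
  have : d ≤ p := le_trans (by nlinarith) hle
  omega

def jump_by_factor_to_last_alt (x : List Int) : Bool :=
  match PySem.List.pyGet? x 0 with
  | none => false   -- unreachable under Pre_
  | some n =>
    let p : Int := (x.length : Int) - 1
    if n ≤ 0 ∨ p < 2 ∨ PySem.Int.mod n p ≠ 0 then false
    else if PySem.Int.mod p 2 = 0 then decide (p = 2)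
    else jumpLoopB p 3 (by omega)

-- ===== PRECONDITION & SPEC =====
-- Pre_ excludes only the empty list, on which Python A (and B alike) raises IndexError at x[0].
def Pre_jump_by_factor_to_last (x : List Int) : Prop := x ≠ []
instance (x : List Int) : Decidable (Pre_jump_by_factor_to_last x) := by
  unfold Pre_jump_by_factor_to_last; infer_instance
def pvWitness_jump_by_factor_to_last : List Int := [6, 0, 0, 0]
def Spec_jump_by_factor_to_last (x : List Int) (out : Bool) : Prop := out = jump_by_factor_to_last_alt x
instance (x : List Int) (out : Bool) : Decidable (Spec_jump_by_factor_to_last x out) := by unfold Spec_jump_by_factor_to_last; infer_instance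

-- ===== CLAIM (what is proved, stated in full; the proofs are below) =====
def Claim_equal_jump_by_factor_to_last : Prop := ∀ (x : List Int), Dom_jump_by_factor_to_last x → Pre_jump_by_factor_to_last x → Spec_jump_by_factor_to_last x (jump_by_factor_to_last x)

-- ===== LEMMAS AND PROOFS =====

-- An integer ≥ 2 with no divisor in [2, f) other than itself below f is prime.
lemma int_prime_of_min_dvd (f : Int) (hf : 2 ≤ f)
    (h : ∀ d : Int, 2 ≤ d → d < f → ¬ d ∣ f) : Prime f := by
  rw [Int.prime_iff_natAbs_prime, Nat.prime_def_lt]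
  constructor
  · omega
  · intro m hm hdvd
    by_contra hne
    have hm0 : m ≠ 0 := by
      rintro rfl
      have := Nat.eq_zero_of_zero_dvd hdvd
      omega
    have : (m : Int) ∣ f := by
      have := Int.natCast_dvd_natCast.mpr hdvd
      simpa [Int.natAbs_of_nonneg (by omega : (0:Int) ≤ f)] using this
    exact h m (by omega) (by omega) this

lemma int_not_prime_of_dvd (p d : Int) (h2 : 2 ≤ d) (hlt : d < p) (hdvd : d ∣ p) : ¬ Prime p := by
  intro hp
  rw [Int.prime_iff_natAbs_prime] at hp
  have hdn : d.natAbs ∣ p.natAbs := Int.natAbs_dvd_natAbs.mpr hdvd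
  have := hp.eq_one_or_self_of_dvd d.natAbs hdn
  omega

lemma int_prime_of_no_sqrt_dvd (p : Int) (hp : 2 ≤ p)
    (h : ∀ m : Int, 2 ≤ m → m * m ≤ p → ¬ m ∣ p) : Prime p := by
  apply int_prime_of_min_dvd p hp
  intro d hd hlt hdvd
  rcases hdvd with ⟨k, hk⟩
  have hk2 : 2 ≤ k := by nlinarith
  by_cases hsq : d * d ≤ p
  · exact h d hd hsq ⟨k, hk⟩
  · have : k * k ≤ p := by nlinarith
    exact h k hk2 this ⟨d, by linarith [hk]⟩

-- Characterization of A's loop: from a state (n, f) where n has no divisor in [2, f),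
-- it returns true iff the target t is a prime ≥ f dividing n.
theorem jumpLoopA_eq (t : Int) (n f : Int) (hf : 2 ≤ f) (hn : 0 < n)
    (hnd : ∀ d : Int, 2 ≤ d → d < f → ¬ d ∣ n) :
    jumpLoopA t n f hf = decide (f ≤ t ∧ t ∣ n ∧ Prime t) := by
  revert hn hnd
  induction n, f, hf using jumpLoopA.induct t with
  | case1 n hf hle hmod =>
    intro hn hnd
    rw [jumpLoopA]
    simp only [dif_pos hle, dif_pos hmod, if_true]
    have htdvd : t ∣ n := (PySem.Int.mod_eq_zero_iff_dvd _ _).1 hmod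
    have hprime : Prime t := by
      apply int_prime_of_min_dvd t hf
      intro d hd hlt hddvd
      exact hnd d hd hlt (hddvd.trans htdvd)
    simp [htdvd, hprime]
  | case2 n f hf hle hmod hne ih =>
    intro hn hnd
    rw [jumpLoopA]
    simp only [dif_pos hle, dif_pos hmod, if_neg hne]
    have hfdvd : f ∣ n := (PySem.Int.mod_eq_zero_iff_dvd _ _).1 hmod
    have hfd : PySem.Int.floordiv n f = n / f := PySem.Int.floordiv_eq_ediv_of_pos (by omega)
    have hmul : n = n / f * f := by
      have := Int.ediv_mul_cancel hfdvd
      linarith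
    have hpos : 0 < n / f := by
      rcases hfdvd with ⟨k, hk⟩
      have : n / f = k := by rw [hk, Int.mul_ediv_cancel_left _ (by omega)]
      nlinarith [this, hk]
    rw [ih (by rw [hfd]; exact hpos) (by
      intro d hd hlt hddvd
      exact hnd d hd hlt (by
        rw [hfd] at hddvd
        exact hddvd.trans ⟨f, hmul⟩))]
    congr 1
    simp only [eq_iff_iff, hfd]
    constructor
    · rintro ⟨h1, h2, h3⟩
      exact ⟨h1, h2.trans ⟨f, hmul⟩, h3⟩
    · rintro ⟨h1, h2, h3⟩
      refine ⟨h1, ?_, h3⟩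
      have := h3.2.2 (n / f) f (hmul ▸ h2)
      rcases this with h | h
      · exact h
      · have := Int.le_of_dvd (by omega) h
        exact absurd (le_antisymm this h1).symm hne
  | case3 n f hf hle hmod ih =>
    intro hn hnd
    rw [jumpLoopA]
    simp only [dif_pos hle, dif_neg hmod]
    have hfnd : ¬ f ∣ n := fun h => hmod ((PySem.Int.mod_eq_zero_iff_dvd _ _).2 h)
    rw [ih hn (by
      intro d hd hlt hddvd
      rcases (by omega : d < f ∨ d = f) with h | rfl
      · exact hnd d hd h hddvd
      · exact hfnd hddvd)]
    congr 1
    simp only [eq_iff_iff]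
    constructor
    · rintro ⟨h1, h2, h3⟩; exact ⟨by omega, h2, h3⟩
    · rintro ⟨h1, h2, h3⟩
      refine ⟨?_, h2, h3⟩
      rcases (by omega : f + 1 ≤ t ∨ t = f) with h | rfl
      · exact h
      · exact absurd h2 hfnd
  | case4 n f hf hle =>
    intro hn hnd
    rw [jumpLoopA]
    simp only [dif_neg hle]
    have : ¬ (f ≤ t ∧ t ∣ n ∧ Prime t) := by
      rintro ⟨h1, h2, h3⟩
      have := Int.le_of_dvd hn h2
      omega
    simp [this]

-- Characterization of B's loop: for odd p ≥ 2 with no divisor in [2, d), d odd ≥ 3,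
-- it decides primality of p.
theorem jumpLoopB_eq (p d : Int) (hd1 : 1 ≤ d) (hd : 3 ≤ d) (hodd : d % 2 = 1)
    (hp : 2 ≤ p) (hpodd : p % 2 = 1)
    (hnd : ∀ m : Int, 2 ≤ m → m < d → ¬ m ∣ p) :
    jumpLoopB p d hd1 = decide (Prime p) := by
  revert hd hodd hnd
  induction d, hd1 using jumpLoopB.induct (p := p) with
  | case1 d hd1 hle hmod =>
    intro hd hodd hnd
    rw [jumpLoopB]
    simp only [dif_pos hle, if_pos hmod]
    have hdvd : d ∣ p := (PySem.Int.mod_eq_zero_iff_dvd _ _).1 hmod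
    have hlt : d < p := by nlinarith
    simp [int_not_prime_of_dvd p d (by omega) hlt hdvd]
  | case2 d hd1 hle hmod ih =>
    intro hd hodd hnd
    rw [jumpLoopB]
    simp only [dif_pos hle, if_neg hmod]
    apply ih (by omega) (by omega)
    intro m hm hlt hdvd
    rcases (by omega : m < d ∨ m = d ∨ m = d + 1) with h | rfl | rfl
    · exact hnd m hm h hdvd
    · exact hmod ((PySem.Int.mod_eq_zero_iff_dvd _ _).2 hdvd)
    · have h2m : (2:Int) ∣ (d + 1) := by omega
      have h2p : (2:Int) ∣ p := h2m.trans hdvd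
      omega
  | case3 d hd1 hle =>
    intro hd hodd hnd
    rw [jumpLoopB]
    simp only [dif_neg hle]
    have : Prime p := by
      apply int_prime_of_no_sqrt_dvd p hp
      intro m hm hsq hdvd
      have : m < d := by nlinarith
      exact hnd m hm this hdvd
    simp [this]

-- ===== VERDICT (by name: the statement is the Claim_ definition above) =====
theorem jump_by_factor_to_last_spec : Claim_equal_jump_by_factor_to_last := by
  intro x _ hpre
  unfold Spec_jump_by_factor_to_last
  match x with
  | [] => exact absurd rfl hpre
  | a :: l =>
    have hget : PySem.List.pyGet? (a :: l) 0 = some a := by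
      simp [PySem.List.pyGet?, PySem.List.pyIdx?]
    simp only [jump_by_factor_to_last, jump_by_factor_to_last_alt, hget]
    set t : Int := ((a :: l).length : Int) - 1 with ht
    have ht0 : 0 ≤ t := by simp [ht]
    have hmod2 : ∀ y : Int, PySem.Int.mod y 2 = y % 2 :=
      fun y => PySem.Int.mod_eq_emod_of_pos (by omega)
    by_cases ha : a ≤ 0
    · -- loop never entered; B's first guard fires
      rw [jumpLoopA]
      simp only [dif_neg (by omega : ¬ (2:Int) ≤ a)]
      rw [if_pos (Or.inl ha)]
    · push Not at ha
      rw [jumpLoopA_eq t a 2 (by omega) ha (by intro d hd hlt _; omega)]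
      by_cases ht2 : t < 2
      · rw [if_pos (Or.inr (Or.inl ht2))]
        simp only [decide_eq_false_iff_not]
        rintro ⟨h1, _, _⟩; omega
      · push Not at ht2
        by_cases hdv : PySem.Int.mod a t ≠ 0
        · rw [if_pos (Or.inr (Or.inr hdv))]
          simp only [decide_eq_false_iff_not]
          rintro ⟨_, h2, _⟩
          exact hdv ((PySem.Int.mod_eq_zero_iff_dvd _ _).2 h2)
        · push Not at hdv
          have htdvd : t ∣ a := (PySem.Int.mod_eq_zero_iff_dvd _ _).1 hdv
          rw [if_neg (by push Not; exact ⟨by omega, by omega, by simp [hdv]⟩)]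
          by_cases hev : PySem.Int.mod t 2 = 0
          · rw [if_pos hev]
            rw [hmod2] at hev
            by_cases h2 : t = 2
            · simp only [h2] at htdvd ⊢
              simp [htdvd, Nat.prime_two]
            · have hnp : ¬ Prime t :=
                int_not_prime_of_dvd t 2 (by omega) (by omega) (by omega)
              simp [h2, hnp]
          · rw [if_neg hev]
            rw [hmod2] at hev
            have hto : t % 2 = 1 := by omega
            rw [jumpLoopB_eq t 3 (by omega) (by omega) (by decide) ht2 hto (by
              intro m hm hlt hdvd
              have hm2 : m = 2 := by omega
              subst hm2
              omega)]
            simp only [decide_eq_decide]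
            constructor
            · rintro ⟨_, _, h3⟩; exact h3
            · intro h; exact ⟨ht2, htdvd, h⟩
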